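-- pv_equiv track=rewrite | github.com/GRYadav1/recreational_repository | StringPalindrome/StringPalindrome.py | checkPalindromes
-- ===== SOURCE A (Python) =====
-- def checkPalindromes(allSubs):
--
--     count = 0
--     for string in allSubs:
--         i = 0
--         j = len(string)-1
--         while(i<=j):
--             if(string[i]==string[j]):
--                 i+=1
--                 j-=1
--             else:
--                 break
--         if(i>j):
--             count+=1
--     return count
-- ===== SOURCE B (Python) =====
-- def checkPalindromes(allSubs):
--     return sum(1 for s in allSubs if s == s[::-1])
-- ===== Notes on version B (the rewrite author's own statement) =====
-- stated objective: idiomatic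
-- what changed: Replaced the per-string two-pointer index scan with early break by a whole-string reversal comparison s == s[::-1], and the counter loop by a generator-sum.
import Mathlib
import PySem

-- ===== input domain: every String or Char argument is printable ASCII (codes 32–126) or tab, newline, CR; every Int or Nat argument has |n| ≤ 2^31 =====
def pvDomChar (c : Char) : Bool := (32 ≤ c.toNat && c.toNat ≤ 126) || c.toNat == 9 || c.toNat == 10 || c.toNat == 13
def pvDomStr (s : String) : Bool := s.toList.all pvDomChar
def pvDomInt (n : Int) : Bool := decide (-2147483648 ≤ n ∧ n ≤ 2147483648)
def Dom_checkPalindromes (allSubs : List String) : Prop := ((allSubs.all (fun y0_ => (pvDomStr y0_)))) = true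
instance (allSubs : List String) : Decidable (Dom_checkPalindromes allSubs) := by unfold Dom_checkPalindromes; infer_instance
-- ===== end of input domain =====

-- B replaces A's two-pointer early-exit index scan by an idiomatic whole-string reversal comparison.

-- ===== PORT A =====
-- the while(i<=j) loop of A; string[i]==string[j] is compared via pyGet?
-- (within A's loop both indices are always in range, so the Option comparison is exact)
def pvPalLoop (cs : List Char) (i j : Int) : Int × Int :=
  if i ≤ j then
    if PySem.List.pyGet? cs i = PySem.List.pyGet? cs j then
      pvPalLoop cs (i + 1) (j - 1)
    else (i, j)
  else (i, j)
termination_by (j - i + 1).toNat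
decreasing_by omega

def checkPalindromes (allSubs : List String) : Int :=
  allSubs.foldl (fun count s =>
    let cs := s.toList
    let r := pvPalLoop cs 0 ((cs.length : Int) - 1)
    if r.2 < r.1 then count + 1 else count) 0

-- ===== PORT B =====
def checkPalindromes_alt (allSubs : List String) : Int :=
  (allSubs.countP (fun s => s.toList = s.toList.reverse) : Int)

-- ===== PRECONDITION & SPEC =====
def Spec_checkPalindromes (allSubs : List String) (out : Int) : Prop := out = checkPalindromes_alt allSubs
instance (allSubs : List String) (out : Int) : Decidable (Spec_checkPalindromes allSubs out) := by unfold Spec_checkPalindromes; infer_instance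

-- ===== CLAIM (what is proved, stated in full; the proofs are below) =====
def Claim_equal_checkPalindromes : Prop := ∀ (allSubs : List String), Dom_checkPalindromes allSubs → Spec_checkPalindromes allSubs (checkPalindromes allSubs)

-- ===== LEMMAS AND PROOFS =====

-- characterisation of A's inner loop: it ends with i > j iff all symmetric positions in [i, j] match
theorem pvPalLoop_iff (cs : List Char) (i j : Int) :
    ((pvPalLoop cs i j).2 < (pvPalLoop cs i j).1) ↔
      (∀ k : Int, i ≤ k → k ≤ j →
        PySem.List.pyGet? cs k = PySem.List.pyGet? cs (i + j - k)) := by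
  induction i, j using pvPalLoop.induct cs with
  | case1 i j hle heq ih =>
    rw [pvPalLoop, if_pos hle, if_pos heq]
    constructor
    · intro h k hik hkj
      by_cases hk : i + 1 ≤ k ∧ k ≤ j - 1
      · have := (ih.mp h) k hk.1 hk.2
        rw [this]; ring_nf
      · rcases (by omega : k = i ∨ k = j) with h' | h'
        · subst h'
          rw [show k + j - k = j from by ring]; exact heq
        · subst h'
          rw [show i + k - k = i from by ring]; exact heq.symm
    · intro h
      apply ih.mpr
      intro k h1 h2
      have := h k (by omega) (by omega)
      rw [this]; ring_nf
  | case2 i j hle heq =>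
    rw [pvPalLoop, if_pos hle, if_neg heq]
    constructor
    · intro h; exact absurd h (by omega)
    · intro h; exact absurd (by simpa using h i le_rfl hle) heq
  | case3 i j hle =>
    rw [pvPalLoop, if_neg hle]
    constructor
    · intro _ k h1 h2; omega
    · intro _; omega

-- a string is counted by A's loop iff it equals its reverse
theorem pvPal_iff_reverse (cs : List Char) :
    ((pvPalLoop cs 0 ((cs.length : Int) - 1)).2 < (pvPalLoop cs 0 ((cs.length : Int) - 1)).1) ↔
      cs = cs.reverse := by
  rw [pvPalLoop_iff]
  constructor
  · intro h
    apply List.ext_getElem (by simp)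
    intro n h1 h2
    have hn : (n : Int) ≤ (cs.length : Int) - 1 := by omega
    have := h (n : Int) (by omega) hn
    rw [PySem.List.pyGet?_natCast] at this
    have he : (0 : Int) + ((cs.length : Int) - 1) - (n : Int) = ((cs.length - 1 - n : Nat) : Int) := by
      omega
    rw [he, PySem.List.pyGet?_natCast] at this
    have hlt : cs.length - 1 - n < cs.length := by omega
    rw [List.getElem?_eq_getElem h1, List.getElem?_eq_getElem hlt] at this
    simp only [List.getElem_reverse]
    exact Option.some.inj this
  · intro h k h1 h2
    have hk : k.toNat < cs.length := by omega
    rw [PySem.List.pyGet?_of_nonneg cs h1, PySem.List.pyGet?_of_nonneg cs (by omega : (0:Int) ≤ 0 + ((cs.length : Int) - 1) - k)]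
    have hidx : (((0 : Int) + ((cs.length : Int) - 1) - k)).toNat = cs.length - 1 - k.toNat := by
      omega
    rw [hidx]
    have hlt : cs.length - 1 - k.toNat < cs.length := by omega
    rw [List.getElem?_eq_getElem hk, List.getElem?_eq_getElem hlt]
    congr 1
    rw [List.getElem_of_eq h hk, List.getElem_reverse]

-- ===== VERDICT (by name: the statement is the Claim_ definition above) =====
theorem checkPalindromes_spec : Claim_equal_checkPalindromes := by
  intro allSubs _
  unfold Spec_checkPalindromes checkPalindromes checkPalindromes_alt
  have hstep : (fun (count : Int) (s : String) =>
      let cs := s.toList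
      let r := pvPalLoop cs 0 ((cs.length : Int) - 1)
      if r.2 < r.1 then count + 1 else count)
    = (fun (count : Int) (s : String) =>
      if (pvPalLoop s.toList 0 ((s.toList.length : Int) - 1)).2 <
          (pvPalLoop s.toList 0 ((s.toList.length : Int) - 1)).1
        then count + 1 else count) := rfl
  rw [hstep, PySem.List.foldl_ite_add_one]
  rw [zero_add]
  congr 1
  apply List.countP_congr
  intro s _
  simp only [decide_eq_true_eq]
  exact pvPal_iff_reverse s.toList
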